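-- pv_equiv track=rewrite | github.com/spriteboysz/LeetcodePython | LCP/LCP 39. 无人机方阵.py | minimumSwitchingTimes
-- ===== SOURCE A (Python) =====
-- from typing import List
--
-- def minimumSwitchingTimes(source: List[List[int]], target: List[List[int]]) -> int:
--     color = dict()
--     for i in range(len(source)):
--         for j in range(len(source[0])):
--             if source[i][j] in color:
--                 color[source[i][j]] += 1
--             else:
--                 color[source[i][j]] = 1
--             if target[i][j] in color:
--                 color[target[i][j]] -= 1
--             else:
--                 color[target[i][j]] = -1
--     return sum(map(abs, color.values())) // 2
-- ===== SOURCE B (Python) =====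
-- from typing import List
--
-- def minimumSwitchingTimes(source: List[List[int]], target: List[List[int]]) -> int:
--     src, tgt = [], []
--     for i in range(len(source)):
--         for j in range(len(source[0])):
--             src.append(source[i][j])
--             tgt.append(target[i][j])
--     src.sort()
--     tgt.sort()
--     i = j = match = 0
--     while i < len(src) and j < len(tgt):
--         if src[i] == tgt[j]:
--             match += 1
--             i += 1
--             j += 1
--         elif src[i] < tgt[j]:
--             i += 1
--         else:
--             j += 1
--     return len(src) - match
-- ===== Notes on version B (the rewrite author's own statement) =====
-- stated objective: alternative
-- what changed: A tallies an interleaved signed dict (+1 source, -1 target) and returns sum(map(abs, values))//2; B flattens both grids over the same index bounds, sorts the two flat lists, counts multiset-matched elements with a two-pointer merge, and returns len(src) - matches (no hashing, no abs, no halving).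
import Mathlib
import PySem

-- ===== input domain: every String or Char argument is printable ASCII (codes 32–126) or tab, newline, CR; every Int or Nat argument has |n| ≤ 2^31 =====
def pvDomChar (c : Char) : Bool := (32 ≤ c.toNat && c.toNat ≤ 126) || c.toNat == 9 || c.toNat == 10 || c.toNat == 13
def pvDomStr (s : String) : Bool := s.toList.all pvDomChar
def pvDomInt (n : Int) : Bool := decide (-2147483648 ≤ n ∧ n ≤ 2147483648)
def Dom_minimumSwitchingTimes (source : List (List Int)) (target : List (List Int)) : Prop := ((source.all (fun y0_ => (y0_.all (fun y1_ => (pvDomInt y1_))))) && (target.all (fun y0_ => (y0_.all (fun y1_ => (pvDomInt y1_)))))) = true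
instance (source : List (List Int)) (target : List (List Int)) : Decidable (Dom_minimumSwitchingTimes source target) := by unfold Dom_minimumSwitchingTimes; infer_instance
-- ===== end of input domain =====

-- B replaces A's signed hash tally + sum(abs)//2 by a sort-and-merge algorithm: flatten both grids
-- over A's index bounds, sort the two flat lists, count matched elements with a two-pointer merge,
-- and return len(src) - matches — a different algorithm of similar cost.

-- ===== PORT A =====
-- g[i][j]; total form of subscripting, exact when indices are in range (guaranteed by Pre_)
def pvCell (g : List (List Int)) (i j : Int) : Int :=
  PySem.List.pyGetD (PySem.List.pyGetD g i []) j 0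

def minimumSwitchingTimes (source : List (List Int)) (target : List (List Int)) : Int :=
  let color : PySem.Dict Int Int :=
    (PySem.List.pyRange 0 source.length 1).foldl (fun color i =>
      (PySem.List.pyRange 0 (source.headD []).length 1).foldl (fun color j =>
        let s := pvCell source i j
        let color1 := if color.contains s then color.insert s (color.getD s 0 + 1)
                      else color.insert s 1
        let t := pvCell target i j
        if color1.contains t then color1.insert t (color1.getD t 0 - 1)
        else color1.insert t (-1)) color)
      PySem.Dict.empty
  PySem.Int.floordiv ((color.values.map (fun v => |v|)).sum) 2

-- ===== PORT B =====
-- the `while i < len(src) and j < len(tgt)` merge loop of Source B, step for step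
def pvTpLoop (src tgt : List Int) (i j m : Int) : Int :=
  if h : i < (src.length : Int) ∧ j < (tgt.length : Int) then
    if PySem.List.pyGetD src i 0 = PySem.List.pyGetD tgt j 0 then
      pvTpLoop src tgt (i + 1) (j + 1) (m + 1)
    else if PySem.List.pyGetD src i 0 < PySem.List.pyGetD tgt j 0 then
      pvTpLoop src tgt (i + 1) j m
    else pvTpLoop src tgt i (j + 1) m
  else m
termination_by ((src.length : Int) - i).toNat + ((tgt.length : Int) - j).toNat
decreasing_by all_goals omega

def minimumSwitchingTimes_alt (source : List (List Int)) (target : List (List Int)) : Int :=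
  let p :=
    (PySem.List.pyRange 0 source.length 1).foldl (fun p i =>
      (PySem.List.pyRange 0 (source.headD []).length 1).foldl (fun p j =>
        (p.1 ++ [pvCell source i j], p.2 ++ [pvCell target i j])) p)
      (([] : List Int), ([] : List Int))
  let src := PySem.List.sorted p.1 (fun x => x) false
  let tgt := PySem.List.sorted p.2 (fun x => x) false
  (src.length : Int) - pvTpLoop src tgt 0 0 0

-- ===== PRECONDITION & SPEC =====
-- Pre_ excludes exactly the inputs on which Python A raises IndexError: source[0] is nonempty and
-- some source row, or one of the first len(source) target rows, is shorter than source[0]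
-- (or target has fewer rows than source); when source[0] is empty no cell is ever indexed.
def Pre_minimumSwitchingTimes (source : List (List Int)) (target : List (List Int)) : Prop :=
  (source.headD []).length = 0 ∨
  (source.length ≤ target.length ∧
   ∀ i < source.length, (source.headD []).length ≤ (source.getD i []).length ∧
                        (source.headD []).length ≤ (target.getD i []).length)
instance (source : List (List Int)) (target : List (List Int)) : Decidable (Pre_minimumSwitchingTimes source target) := by unfold Pre_minimumSwitchingTimes; infer_instance

def pvWitness_minimumSwitchingTimes : List (List Int) × List (List Int) := ([[1, 2], [2, 3]], [[2, 2], [3, 1]])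

def Spec_minimumSwitchingTimes (source : List (List Int)) (target : List (List Int)) (out : Int) : Prop := out = minimumSwitchingTimes_alt source target
instance (source : List (List Int)) (target : List (List Int)) (out : Int) : Decidable (Spec_minimumSwitchingTimes source target out) := by unfold Spec_minimumSwitchingTimes; infer_instance

-- ===== CLAIM (what is proved, stated in full; the proofs are below) =====
def Claim_equal_minimumSwitchingTimes : Prop := ∀ (source : List (List Int)) (target : List (List Int)), Dom_minimumSwitchingTimes source target → Pre_minimumSwitchingTimes source target → Spec_minimumSwitchingTimes source target (minimumSwitchingTimes source target)

-- ===== LEMMAS AND PROOFS =====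

-- the cell pairs (source[i][j], target[i][j]) in A's traversal order
def pvPairs (source : List (List Int)) (target : List (List Int)) : List (Int × Int) :=
  (PySem.List.pyRange 0 source.length 1).flatMap (fun i =>
    (PySem.List.pyRange 0 (source.headD []).length 1).map (fun j =>
      (pvCell source i j, pvCell target i j)))

-- one iteration of A's loop body
def pvStepA (d : PySem.Dict Int Int) (c : Int × Int) : PySem.Dict Int Int :=
  let s := c.1
  let color1 := if d.contains s then d.insert s (d.getD s 0 + 1) else d.insert s 1
  let t := c.2
  if color1.contains t then color1.insert t (color1.getD t 0 - 1) else color1.insert t (-1)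

lemma pvGetD_update (d : PySem.Dict Int Int) (a w k : Int) :
    (if d.contains a then d.insert a (d.getD a 0 + w) else d.insert a w).getD k 0
      = d.getD k 0 + (if k = a then w else 0) := by
  by_cases hc : d.contains a = true
  · rw [if_pos hc, PySem.Dict.getD_insert]
    split_ifs with h
    · subst h; ring
    · ring
  · have hc' : d.contains a = false := by simpa using hc
    rw [if_neg (by simp [hc']), PySem.Dict.getD_insert]
    split_ifs with h
    · subst h; rw [PySem.Dict.getD_of_not_contains d 0 hc']; ring
    · ring

lemma getD_pvStepA (d : PySem.Dict Int Int) (c : Int × Int) (k : Int) :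
    (pvStepA d c).getD k 0
      = d.getD k 0 + (if k = c.1 then 1 else 0) - (if k = c.2 then 1 else 0) := by
  obtain ⟨s, t⟩ := c
  simp only [pvStepA, sub_eq_add_neg]
  rw [pvGetD_update, pvGetD_update]
  split_ifs <;> ring

lemma mem_keys_pvStepA (d : PySem.Dict Int Int) (c : Int × Int) (k : Int) :
    k ∈ (pvStepA d c).keys ↔ k = c.1 ∨ k = c.2 ∨ k ∈ d.keys := by
  obtain ⟨s, t⟩ := c
  simp only [pvStepA]
  split_ifs <;> simp [PySem.Dict.mem_keys_insert] <;> tauto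

lemma nodup_keys_pvStepA (d : PySem.Dict Int Int) (c : Int × Int) (h : d.keys.Nodup) :
    (pvStepA d c).keys.Nodup := by
  obtain ⟨s, t⟩ := c
  simp only [pvStepA]
  split_ifs <;> exact PySem.Dict.nodup_keys_insert _ _ _ (PySem.Dict.nodup_keys_insert _ _ _ h)

lemma foldA_getD (P : List (Int × Int)) : ∀ (d : PySem.Dict Int Int) (k : Int),
    (P.foldl pvStepA d).getD k 0
      = d.getD k 0 + ((P.map Prod.fst).count k : Int) - ((P.map Prod.snd).count k : Int) := by
  induction P with
  | nil => simp
  | cons c P ih =>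
    intro d k
    rw [List.foldl_cons, ih, getD_pvStepA]
    simp only [List.map_cons, List.count_cons, beq_iff_eq]
    push_cast
    split_ifs <;> omega

lemma foldA_mem_keys (P : List (Int × Int)) : ∀ (d : PySem.Dict Int Int) (k : Int),
    k ∈ (P.foldl pvStepA d).keys ↔ k ∈ d.keys ∨ k ∈ P.map Prod.fst ∨ k ∈ P.map Prod.snd := by
  induction P with
  | nil => simp
  | cons c P ih =>
    intro d k
    rw [List.foldl_cons, ih]
    simp [mem_keys_pvStepA]
    tauto

lemma foldA_nodup (P : List (Int × Int)) : ∀ (d : PySem.Dict Int Int), d.keys.Nodup →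
    (P.foldl pvStepA d).keys.Nodup := by
  induction P with
  | nil => intro d h; simpa using h
  | cons c P ih => intro d h; exact ih _ (nodup_keys_pvStepA d c h)

-- A in terms of the pair list
lemma A_char (source target : List (List Int)) :
    minimumSwitchingTimes source target
      = PySem.Int.floordiv
          ((((pvPairs source target).foldl pvStepA PySem.Dict.empty).values.map (fun v => |v|)).sum) 2 := by
  unfold minimumSwitchingTimes pvPairs
  rw [List.foldl_flatMap]
  simp only [List.foldl_map]
  rfl

-- the two-pointer merge as structural recursion on the remaining suffixes
def pvTpMatch : List Int → List Int → Int
  | [], _ => 0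
  | _ :: _, [] => 0
  | a :: s, b :: t =>
    if a = b then 1 + pvTpMatch s t
    else if a < b then pvTpMatch s (b :: t)
    else pvTpMatch (a :: s) t
termination_by s t => s.length + t.length

-- while-loop ↔ suffix recursion
lemma pvTpLoop_eq_match (src tgt : List Int) (i j m : Int) (hi : 0 ≤ i) (hj : 0 ≤ j) :
    pvTpLoop src tgt i j m = m + pvTpMatch (src.drop i.toNat) (tgt.drop j.toNat) := by
  rw [pvTpLoop]
  split_ifs with h heq hlt
  · have h1 : i.toNat < src.length := by omega
    have h2 : j.toNat < tgt.length := by omega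
    rw [pvTpLoop_eq_match src tgt (i + 1) (j + 1) (m + 1) (by omega) (by omega)]
    rw [List.drop_eq_getElem_cons h1, List.drop_eq_getElem_cons h2, pvTpMatch]
    rw [PySem.List.pyGetD_eq_getElem src 0 hi h.1, PySem.List.pyGetD_eq_getElem tgt 0 hj h.2] at heq
    have e1 : (i + 1).toNat = i.toNat + 1 := by omega
    have e2 : (j + 1).toNat = j.toNat + 1 := by omega
    rw [if_pos heq, e1, e2]
    ring
  · have h1 : i.toNat < src.length := by omega
    have h2 : j.toNat < tgt.length := by omega
    rw [pvTpLoop_eq_match src tgt (i + 1) j m (by omega) hj]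
    rw [List.drop_eq_getElem_cons h1, List.drop_eq_getElem_cons h2, pvTpMatch]
    rw [PySem.List.pyGetD_eq_getElem src 0 hi h.1, PySem.List.pyGetD_eq_getElem tgt 0 hj h.2] at heq hlt
    have e1 : (i + 1).toNat = i.toNat + 1 := by omega
    rw [if_neg heq, if_pos hlt, e1, ← List.drop_eq_getElem_cons h2]
  · have h1 : i.toNat < src.length := by omega
    have h2 : j.toNat < tgt.length := by omega
    rw [pvTpLoop_eq_match src tgt i (j + 1) m hi (by omega)]
    rw [List.drop_eq_getElem_cons h1, List.drop_eq_getElem_cons h2, pvTpMatch]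
    rw [PySem.List.pyGetD_eq_getElem src 0 hi h.1, PySem.List.pyGetD_eq_getElem tgt 0 hj h.2] at heq hlt
    have e2 : (j + 1).toNat = j.toNat + 1 := by omega
    rw [if_neg heq, if_neg hlt, e2, ← List.drop_eq_getElem_cons h1]
  · rcases Nat.lt_or_ge i.toNat src.length with h1 | h1
    · have h2 : tgt.length ≤ j.toNat := by omega
      rw [List.drop_eq_getElem_cons h1, List.drop_of_length_le h2, pvTpMatch]
      ring
    · rw [List.drop_of_length_le h1, pvTpMatch]
      ring
termination_by (((src.length : Int) - i).toNat + ((tgt.length : Int) - j).toNat)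
decreasing_by all_goals omega

-- on sorted lists the merge counts the multiset intersection
lemma pvTpMatch_inter : ∀ (s t : List Int), s.Pairwise (· ≤ ·) → t.Pairwise (· ≤ ·) →
    pvTpMatch s t = (((s : Multiset Int) ∩ (t : Multiset Int)).card : Int)
  | [], t, _, _ => by simp [pvTpMatch]
  | a :: s, [], _, _ => by simp [pvTpMatch]
  | a :: s, b :: t, hs, ht => by
    rw [pvTpMatch]
    split_ifs with heq hlt
    · subst heq
      have hinter : ((a :: s : List Int) : Multiset Int) ∩ ((a :: t : List Int) : Multiset Int)
          = a ::ₘ (((s : List Int) : Multiset Int) ∩ ((t : List Int) : Multiset Int)) := by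
        apply Multiset.ext.2
        intro x
        simp only [Multiset.count_inter, Multiset.count_cons, Multiset.coe_count,
          List.count_cons, beq_iff_eq]
        split_ifs <;> omega
      rw [hinter, Multiset.card_cons,
          pvTpMatch_inter s t (List.Pairwise.of_cons hs) (List.Pairwise.of_cons ht)]
      push_cast
      ring
    · have hna : (b :: t).count a = 0 := by
        rw [List.count_eq_zero]
        intro hmem
        rcases List.mem_cons.1 hmem with h | h
        · omega
        · have := (List.pairwise_cons.1 ht).1 a h
          omega
      have hinter : ((a :: s : List Int) : Multiset Int) ∩ ((b :: t : List Int) : Multiset Int)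
          = ((s : List Int) : Multiset Int) ∩ ((b :: t : List Int) : Multiset Int) := by
        apply Multiset.ext.2
        intro x
        simp only [Multiset.count_inter, Multiset.coe_count]
        by_cases hx : x = a
        · subst hx
          rw [List.count_cons_self, hna]
          omega
        · rw [List.count_cons_of_ne (Ne.symm hx)]
      rw [hinter, pvTpMatch_inter s (b :: t) (List.Pairwise.of_cons hs) ht]
    · have hnb : (a :: s).count b = 0 := by
        rw [List.count_eq_zero]
        intro hmem
        rcases List.mem_cons.1 hmem with h | h
        · omega
        · have := (List.pairwise_cons.1 hs).1 b h
          omega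
      have hinter : ((a :: s : List Int) : Multiset Int) ∩ ((b :: t : List Int) : Multiset Int)
          = ((a :: s : List Int) : Multiset Int) ∩ ((t : List Int) : Multiset Int) := by
        apply Multiset.ext.2
        intro x
        simp only [Multiset.count_inter, Multiset.coe_count]
        by_cases hx : x = b
        · subst hx
          rw [List.count_cons_self, hnb]
          omega
        · rw [List.count_cons_of_ne (Ne.symm hx)]
      rw [hinter, pvTpMatch_inter (a :: s) t hs (List.Pairwise.of_cons ht)]
termination_by s t => s.length + t.length

-- B in terms of the pair list
lemma B_char (source target : List (List Int)) :
    minimumSwitchingTimes_alt source target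
      = ((((pvPairs source target).map Prod.fst).length : Int))
        - ((((((pvPairs source target).map Prod.fst) : List Int) : Multiset Int)
            ∩ ((((pvPairs source target).map Prod.snd) : List Int) : Multiset Int)).card : Int) := by
  have hfold : ((PySem.List.pyRange 0 source.length 1).foldl (fun p i =>
      (PySem.List.pyRange 0 (source.headD []).length 1).foldl (fun p j =>
        (p.1 ++ [pvCell source i j], p.2 ++ [pvCell target i j])) p)
      (([] : List Int), ([] : List Int)))
      = ((pvPairs source target).map Prod.fst, (pvPairs source target).map Prod.snd) := by
    have h1 : ((PySem.List.pyRange 0 source.length 1).foldl (fun p i =>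
        (PySem.List.pyRange 0 (source.headD []).length 1).foldl (fun p j =>
          (p.1 ++ [pvCell source i j], p.2 ++ [pvCell target i j])) p)
        (([] : List Int), ([] : List Int)))
        = (pvPairs source target).foldl
            (fun (p : List Int × List Int) (c : Int × Int) => (p.1 ++ [c.1], p.2 ++ [c.2]))
            ([], []) := by
      unfold pvPairs
      rw [List.foldl_flatMap]
      simp only [List.foldl_map]
    rw [h1, PySem.List.foldl_prod_mk
      (fun (l : List Int) (c : Int × Int) => l ++ [c.1])
      (fun (l : List Int) (c : Int × Int) => l ++ [c.2]) _ _ _]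
    rw [PySem.List.foldl_append_singleton_eq_map, PySem.List.foldl_append_singleton_eq_map]
    simp
  set S := (pvPairs source target).map Prod.fst with hS
  set T := (pvPairs source target).map Prod.snd with hT
  simp only [minimumSwitchingTimes_alt]
  rw [hfold]
  have hlenS : (PySem.List.sorted S (fun x => x) false).length = S.length :=
    PySem.List.length_sorted S (fun x => x) false
  have hloop := pvTpLoop_eq_match (PySem.List.sorted S (fun x => x) false)
      (PySem.List.sorted T (fun x => x) false) 0 0 0 le_rfl le_rfl
  simp only [Int.toNat_zero, List.drop_zero, zero_add] at hloop
  rw [hloop, pvTpMatch_inter _ _ (PySem.List.sorted_pairwise S (fun x => x))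
        (PySem.List.sorted_pairwise T (fun x => x)), hlenS]
  have hpS : ((PySem.List.sorted S (fun x => x) false : List Int) : Multiset Int) = (S : Multiset Int) :=
    Multiset.coe_eq_coe.2 (PySem.List.sorted_perm S (fun x => x) false)
  have hpT : ((PySem.List.sorted T (fun x => x) false : List Int) : Multiset Int) = (T : Multiset Int) :=
    Multiset.coe_eq_coe.2 (PySem.List.sorted_perm T (fun x => x) false)
  rw [hpS, hpT]

-- the combinatorial core: sum(|c_S - c_T|)//2 = |S| - |S ∩ T| when |S| = |T|
lemma pv_main (S T K : List Int) (hnd : K.Nodup)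
    (hmem : ∀ k, k ∈ K ↔ k ∈ S ∨ k ∈ T) (hlen : S.length = T.length) :
    PySem.Int.floordiv ((K.map (fun k => |((S.count k : Int) - (T.count k : Int))|)).sum) 2
      = (S.length : Int) - (((S : Multiset Int) ∩ (T : Multiset Int)).card : Int) := by
  set δ : Int → Int := fun k => (S.count k : Int) - (T.count k : Int) with hδ
  set U : Finset Int := S.toFinset ∪ T.toFinset with hU
  have hKfin : K.toFinset = U := by
    ext x; simp [hmem, hU]
  have hK : (K.map (fun k => |δ k|)).sum = ∑ k ∈ U, |δ k| := by
    rw [← hKfin, List.sum_toFinset _ hnd]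
  have hcntS : ∑ k ∈ U, (S.count k : Int) = (S.length : Int) := by
    have h1 : ∑ k ∈ U, S.count k = ∑ k ∈ S.toFinset, S.count k :=
      (Finset.sum_subset Finset.subset_union_left
        (fun x _ hx => List.count_eq_zero.2 (fun h => hx (List.mem_toFinset.2 h)))).symm
    have := List.sum_toFinset_count_eq_length S
    rw [← Nat.cast_sum, h1, this]
  have hcntT : ∑ k ∈ U, (T.count k : Int) = (T.length : Int) := by
    have h1 : ∑ k ∈ U, T.count k = ∑ k ∈ T.toFinset, T.count k :=
      (Finset.sum_subset Finset.subset_union_right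
        (fun x _ hx => List.count_eq_zero.2 (fun h => hx (List.mem_toFinset.2 h)))).symm
    have := List.sum_toFinset_count_eq_length T
    rw [← Nat.cast_sum, h1, this]
  have hsum0 : ∑ k ∈ U, δ k = 0 := by
    simp only [hδ, Finset.sum_sub_distrib, hcntS, hcntT, hlen, sub_self]
  have hsplit : ∀ x : Int, |x| = max 0 x + max 0 (-x) := by
    intro x
    rcases le_total 0 x with h | h
    · rw [abs_of_nonneg h, max_eq_right h, max_eq_left (by omega)]; ring
    · rw [abs_of_nonpos h, max_eq_left h, max_eq_right (by omega)]; ring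
  have hbal : ∑ k ∈ U, max 0 (-δ k) = ∑ k ∈ U, max 0 (δ k) := by
    have h1 : ∑ k ∈ U, (max 0 (δ k) - max 0 (-δ k)) = ∑ k ∈ U, δ k := by
      refine Finset.sum_congr rfl (fun x _ => ?_)
      rcases le_total 0 (δ x) with h | h
      · rw [max_eq_right h, max_eq_left (by omega)]; ring
      · rw [max_eq_left h, max_eq_right (by omega)]; ring
    rw [Finset.sum_sub_distrib, hsum0] at h1
    omega
  have habs : ∑ k ∈ U, |δ k| = 2 * ∑ k ∈ U, max 0 (δ k) := by
    calc ∑ k ∈ U, |δ k| = ∑ k ∈ U, (max 0 (δ k) + max 0 (-δ k)) :=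
          Finset.sum_congr rfl (fun x _ => hsplit (δ x))
      _ = ∑ k ∈ U, max 0 (δ k) + ∑ k ∈ U, max 0 (-δ k) := Finset.sum_add_distrib
      _ = 2 * ∑ k ∈ U, max 0 (δ k) := by rw [hbal]; ring
  -- |S ∩ T| = ∑_U min(c_S, c_T)
  have hintercnt : (((S : Multiset Int) ∩ (T : Multiset Int)).card : Int)
      = ∑ k ∈ U, min ((S.count k : Int)) ((T.count k : Int)) := by
    have hsub : ((S : Multiset Int) ∩ (T : Multiset Int)).toFinset ⊆ U := by
      intro x hx
      have := Multiset.mem_toFinset.1 hx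
      have := Multiset.mem_inter.1 this
      simp [hU, Multiset.mem_coe.1 this.1]
    have hcard := Multiset.toFinset_sum_count_eq ((S : Multiset Int) ∩ (T : Multiset Int))
    have hext : ∑ k ∈ U, Multiset.count k ((S : Multiset Int) ∩ (T : Multiset Int))
        = ∑ k ∈ ((S : Multiset Int) ∩ (T : Multiset Int)).toFinset,
            Multiset.count k ((S : Multiset Int) ∩ (T : Multiset Int)) := by
      refine (Finset.sum_subset hsub (fun x _ hx => ?_)).symm
      exact Multiset.count_eq_zero.2 (fun h => hx (Multiset.mem_toFinset.2 h))
    have : (((S : Multiset Int) ∩ (T : Multiset Int)).card : Int)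
        = ∑ k ∈ U, (Multiset.count k ((S : Multiset Int) ∩ (T : Multiset Int)) : Int) := by
      rw [← Nat.cast_sum, hext, hcard]
    rw [this]
    refine Finset.sum_congr rfl (fun x _ => ?_)
    simp only [Multiset.count_inter, Multiset.coe_count]
    push_cast [Nat.cast_min]
    rfl
  have hmaxmin : ∑ k ∈ U, max 0 (δ k)
      = (S.length : Int) - ∑ k ∈ U, min ((S.count k : Int)) ((T.count k : Int)) := by
    rw [← hcntS, ← Finset.sum_sub_distrib]
    refine Finset.sum_congr rfl (fun x _ => ?_)
    simp only [hδ]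
    omega
  rw [hK, habs, hintercnt, hmaxmin, PySem.Int.floordiv_eq_ediv_of_pos (by norm_num)]
  exact Int.mul_ediv_cancel_left _ (by norm_num)

-- ===== VERDICT (by name: the statement is the Claim_ definition above) =====
theorem minimumSwitchingTimes_spec : Claim_equal_minimumSwitchingTimes := by
  intro source target _ _
  unfold Spec_minimumSwitchingTimes
  rw [A_char, B_char]
  set P := pvPairs source target with hP
  set D := P.foldl pvStepA PySem.Dict.empty with hD
  have hnd : D.keys.Nodup := foldA_nodup P PySem.Dict.empty (by simp)
  have hvals : D.values = D.keys.map (fun k => D.getD k 0) :=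
    PySem.Dict.values_eq_map_keys D hnd 0
  rw [hvals, List.map_map]
  have habs : ((fun v => |v|) ∘ fun k => D.getD k 0)
      = fun k => |(((P.map Prod.fst).count k : Int) - ((P.map Prod.snd).count k : Int))| := by
    funext k
    simp [hD, foldA_getD]
  rw [habs]
  have hlen : (P.map Prod.fst).length = (P.map Prod.snd).length := by simp
  rw [pv_main (P.map Prod.fst) (P.map Prod.snd) D.keys hnd
    (fun k => by rw [hD, foldA_mem_keys]; simp) hlen]
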